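-- pv_equiv track=rewrite | github.com/andrewzhen/mymoney-public | money.py | listToCSV
-- ===== SOURCE A (Python) =====
-- def listToCSV(lst):
--   new_file, counter = "", 1
--   for cell in lst:
--     if counter < 4:
--       new_file += str(cell) + ","
--     else:
--       new_file += str(cell) + "\n"
--       counter = 0
--     counter += 1
--   return new_file
-- ===== SOURCE B (Python) =====
-- def listToCSV(lst):
--   rows = []
--   for i in range(0, len(lst), 4):
--     chunk = lst[i:i+4]
--     if len(chunk) == 4:
--       rows.append(",".join(map(str, chunk)) + "\n")
--     else:
--       rows.append(",".join(map(str, chunk)) + ",")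
--   return "".join(rows)
-- ===== Notes on version B (the rewrite author's own statement) =====
-- stated objective: alternative
-- what changed: B chunks the list into groups of four and emits one joined row-string per chunk (newline for full chunks, trailing comma for a short final chunk), instead of A's cell-by-cell append with a counter that resets every fourth element.
import Mathlib
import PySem

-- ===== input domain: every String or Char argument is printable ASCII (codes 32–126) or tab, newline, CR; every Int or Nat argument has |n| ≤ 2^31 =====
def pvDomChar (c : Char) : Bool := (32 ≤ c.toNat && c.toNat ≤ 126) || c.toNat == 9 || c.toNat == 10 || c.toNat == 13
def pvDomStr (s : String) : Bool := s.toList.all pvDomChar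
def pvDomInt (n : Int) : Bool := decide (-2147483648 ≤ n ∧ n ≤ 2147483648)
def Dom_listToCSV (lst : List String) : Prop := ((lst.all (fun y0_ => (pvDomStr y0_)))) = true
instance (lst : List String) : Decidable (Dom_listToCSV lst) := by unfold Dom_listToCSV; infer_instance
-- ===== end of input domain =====

-- B re-implements listToCSV by chunking the list into groups of four and joining each row at once (alternative decomposition, same cost), instead of A's per-cell counter loop.


-- ===== PORT A =====
-- A: cell-by-cell loop over (new_file, counter); counter < 4 appends ",", else "\n" and resets.
def listToCSV_loop : List String → String → Int → String
  | [], newFile, _ => newFile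
  | cell :: rest, newFile, counter =>
    if counter < 4 then
      listToCSV_loop rest (newFile ++ cell ++ ",") (counter + 1)
    else
      listToCSV_loop rest (newFile ++ cell ++ "\n") (0 + 1)

def listToCSV (lst : List String) : String := listToCSV_loop lst "" 1

-- ===== PORT B =====
-- B: chunk into groups of four; full chunk -> ",".join + "\n", short trailing chunk -> ",".join + ",".
-- joinComma is the port of ",".join (exact on all strings).
def joinComma : List String → String
  | [] => ""
  | [a] => a
  | a :: rest => a ++ "," ++ joinComma rest

def listToCSV_alt_go : List String → String
  | [] => ""
  | a :: b :: c :: d :: rest =>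
    (joinComma [a, b, c, d] ++ "\n") ++ listToCSV_alt_go rest
  | chunk => joinComma chunk ++ ","

def listToCSV_alt (lst : List String) : String := listToCSV_alt_go lst

-- ===== PRECONDITION & SPEC =====
def Spec_listToCSV (lst : List String) (out : String) : Prop := out = listToCSV_alt lst
instance (lst : List String) (out : String) : Decidable (Spec_listToCSV lst out) := by unfold Spec_listToCSV; infer_instance

-- ===== CLAIM (what is proved, stated in full; the proofs are below) =====
def Claim_equal_listToCSV : Prop := ∀ (lst : List String), Dom_listToCSV lst → Spec_listToCSV lst (listToCSV lst)

-- ===== LEMMAS AND PROOFS =====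

theorem listToCSV_key : ∀ (lst : List String) (s : String),
    listToCSV_loop lst s 1 = s ++ listToCSV_alt_go lst
  | [], s => by simp [listToCSV_loop, listToCSV_alt_go]
  | [a], s => by simp [listToCSV_loop, listToCSV_alt_go, joinComma, String.append_assoc]
  | [a, b], s => by
      simp [listToCSV_loop, listToCSV_alt_go, joinComma, String.append_assoc]
  | [a, b, c], s => by
      simp [listToCSV_loop, listToCSV_alt_go, joinComma, String.append_assoc]
  | a :: b :: c :: d :: rest, s => by
      show listToCSV_loop rest _ (0 + 1) = _
      norm_num
      rw [listToCSV_key rest]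
      simp [listToCSV_alt_go, joinComma, String.append_assoc]

-- ===== VERDICT (by name: the statement is the Claim_ definition above) =====
theorem listToCSV_spec : Claim_equal_listToCSV := by
  intro lst _
  unfold Spec_listToCSV listToCSV listToCSV_alt
  simpa using listToCSV_key lst ""
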